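-- pv_equiv track=rewrite | github.com/nmelgar/CSE_130_BYUI- | week9/problem6_variation.py | numEvenOdd
-- ===== SOURCE A (Python) =====
-- def numEvenOdd(numbers):
--     counterEven = 0
--     counterOdd = 0
--     for number in range(1, numbers + 1):
--         if number % 2 == 0:
--             counterEven += 1
--         elif number % 2 != 0:
--             counterOdd += 1
--     return f"\nThere are {counterEven} even numbers.\nThere are {counterOdd} odd numbers."
-- ===== SOURCE B (Python) =====
-- def numEvenOdd(numbers):
--     m = numbers if numbers > 0 else 0
--     even = m // 2
--     odd = m - even
--     return f"\nThere are {even} even numbers.\nThere are {odd} odd numbers."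
-- ===== Notes on version B (the rewrite author's own statement) =====
-- stated objective: faster
-- what changed: Replaced the per-number counting loop by closed-form arithmetic: even count is the floor of half the upper bound, odd count is the remainder, with empty ranges giving zero counts.
import Mathlib
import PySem

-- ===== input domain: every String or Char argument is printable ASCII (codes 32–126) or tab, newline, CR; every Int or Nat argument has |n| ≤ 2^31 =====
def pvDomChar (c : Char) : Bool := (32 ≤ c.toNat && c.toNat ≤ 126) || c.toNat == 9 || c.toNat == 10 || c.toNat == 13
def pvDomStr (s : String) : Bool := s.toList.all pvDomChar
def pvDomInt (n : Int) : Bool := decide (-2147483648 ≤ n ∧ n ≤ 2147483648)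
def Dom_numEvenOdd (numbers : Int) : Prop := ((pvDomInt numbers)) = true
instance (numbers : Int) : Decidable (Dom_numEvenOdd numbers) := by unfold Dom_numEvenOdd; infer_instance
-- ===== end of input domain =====

-- B replaces A's counting loop over range(1, n+1) by the closed forms even = n//2, odd = n - n//2 (faster).

-- ===== PORT A =====
-- loop body of A, used by the port below
def pvStep : Int × Int → Int → Int × Int := fun acc number =>
  if PySem.Int.mod number 2 = 0 then (acc.1 + 1, acc.2)
  else if PySem.Int.mod number 2 ≠ 0 then (acc.1, acc.2 + 1)
  else acc

def numEvenOdd (numbers : Int) : String :=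
  let p := (PySem.List.pyRange 1 (numbers + 1) 1).foldl pvStep (0, 0)
  "\nThere are " ++ PySem.Int.toStr p.1 ++ " even numbers.\nThere are " ++ PySem.Int.toStr p.2 ++ " odd numbers."

-- ===== PORT B =====
def numEvenOdd_alt (numbers : Int) : String :=
  let m := if numbers > 0 then numbers else 0
  let even := PySem.Int.floordiv m 2
  let odd := m - even
  "\nThere are " ++ PySem.Int.toStr even ++ " even numbers.\nThere are " ++ PySem.Int.toStr odd ++ " odd numbers."

-- ===== PRECONDITION & SPEC =====
def Spec_numEvenOdd (numbers : Int) (out : String) : Prop := out = numEvenOdd_alt numbers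
instance (numbers : Int) (out : String) : Decidable (Spec_numEvenOdd numbers out) := by unfold Spec_numEvenOdd; infer_instance

-- ===== CLAIM (what is proved, stated in full; the proofs are below) =====
def Claim_equal_numEvenOdd : Prop := ∀ (numbers : Int), Dom_numEvenOdd numbers → Spec_numEvenOdd numbers (numEvenOdd numbers)

-- ===== LEMMAS AND PROOFS =====

theorem pvLoop_spec (n : Nat) :
    (PySem.List.pyRange 1 ((n : Int) + 1) 1).foldl pvStep (0, 0)
      = ((n : Int) / 2, (n : Int) - (n : Int) / 2) := by
  induction n with
  | zero => simp [PySem.List.pyRange_one_eq_nil (by norm_num : ((0:Nat):Int) + 1 ≤ 1)]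
  | succ k ih =>
    have h : PySem.List.pyRange 1 ((k : Int) + 1 + 1) 1
        = PySem.List.pyRange 1 ((k : Int) + 1) 1 ++ [(k : Int) + 1] :=
      PySem.List.pyRange_one_succ_right (by omega)
    push_cast
    push_cast at ih
    rw [h, List.foldl_append, ih]
    simp only [List.foldl, pvStep, PySem.Int.mod]
    have hm : ((k : Int) + 1).fmod 2 = ((k : Int) + 1) % 2 := by
      simp [Int.fmod_eq_emod]
    rw [hm]
    split_ifs with h1
    · simp only [Prod.mk.injEq]; omega
    · simp only [Prod.mk.injEq]; omega

-- ===== VERDICT (by name: the statement is the Claim_ definition above) =====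
theorem numEvenOdd_spec : Claim_equal_numEvenOdd := by
  intro numbers _
  unfold Spec_numEvenOdd numEvenOdd numEvenOdd_alt
  by_cases hpos : numbers > 0
  · obtain ⟨n, rfl⟩ : ∃ n : Nat, numbers = (n : Int) :=
      ⟨numbers.toNat, by omega⟩
    rw [pvLoop_spec n]
    have hn : 0 < n := by exact_mod_cast hpos
    simp [PySem.Int.floordiv, Int.fdiv_eq_ediv, hn]
  · have hnil : PySem.List.pyRange 1 (numbers + 1) 1 = [] :=
      PySem.List.pyRange_one_eq_nil (by omega)
    rw [hnil, if_neg hpos]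
    simp [PySem.Int.floordiv]
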